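-- pv_equiv track=rewrite | github.com/jpsamuelson/aurora-icepower-booster | scripts/p5f_apply_lib_refs.py | find_footprint_blocks
-- ===== SOURCE A (Python) =====
-- def extract_balanced(text, start):
--     """Extract balanced parentheses block starting at text[start]='('."""
--     depth = 0
--     i = start
--     while i < len(text):
--         if text[i] == '(':
--             depth += 1
--         elif text[i] == ')':
--             depth -= 1
--             if depth == 0:
--                 return text[start:i+1], i+1
--         i += 1
--     return None, start
--
-- def find_footprint_blocks(text):
--     """Find all (footprint ...) blocks with their positions."""
--     results = []
--     i = 0
--     while True:
--         idx = text.find('(footprint ', i)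
--         if idx < 0:
--             break
--         block, end = extract_balanced(text, idx)
--         if block:
--             results.append((idx, end, block))
--         i = idx + 1
--     return results
-- ===== SOURCE B (Python) =====
-- def find_footprint_blocks(text):
--     """Find all (footprint ...) blocks with their positions."""
--     results = []
--     stack = []  # positions of unmatched '(' with a flag: starts '(footprint '?
--     for i, c in enumerate(text):
--         if c == '(':
--             stack.append((i, text.startswith('(footprint ', i)))
--         elif c == ')' and stack:
--             start, is_fp = stack.pop()
--             if is_fp:
--                 results.append((start, i + 1, text[start:i + 1]))
--     results.sort(key=lambda t: t[0])
--     return results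
-- ===== Notes on version B (the rewrite author's own statement) =====
-- stated objective: alternative
-- what changed: A repeatedly calls str.find for the footprint marker and re-scans forward from each hit with a depth counter; B is a single linear scan that keeps a stack of open-paren positions flagged as footprint starts, emits a block when its paren is popped, and finally sorts the results by start index.
import Mathlib
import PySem

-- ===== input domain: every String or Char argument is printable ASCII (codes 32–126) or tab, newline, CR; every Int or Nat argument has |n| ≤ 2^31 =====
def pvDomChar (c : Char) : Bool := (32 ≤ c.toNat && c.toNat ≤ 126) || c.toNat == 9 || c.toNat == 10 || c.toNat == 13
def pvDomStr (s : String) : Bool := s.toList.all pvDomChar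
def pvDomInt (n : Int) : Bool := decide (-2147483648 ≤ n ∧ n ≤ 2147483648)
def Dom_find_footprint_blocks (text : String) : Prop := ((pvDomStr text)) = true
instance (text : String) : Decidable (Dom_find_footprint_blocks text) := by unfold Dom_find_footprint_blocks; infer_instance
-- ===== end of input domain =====

-- B replaces A's repeated find-and-rescan with one stack-based scan plus a final sort by
-- start position (objective: alternative algorithm; not claimed faster).

-- ===== PORT A =====
def pvPat : List Char := "(footprint ".toList

-- extract_balanced's while loop: returns the index of the ')' that brings depth to 0
-- (the Python function returns (text[start:i+1], i+1); the slice is built in pvExtract below)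
def pvExtractGo : List Char → Int → Nat → Option Nat
  | [], _, _ => none
  | c :: r, depth, i =>
    if c = '(' then pvExtractGo r (depth + 1) (i + 1)
    else if c = ')' then
      if depth - 1 = 0 then some i else pvExtractGo r (depth - 1) (i + 1)
    else pvExtractGo r depth (i + 1)

-- extract_balanced(text, start): (text[start:i+1], i+1) at the closing ')', none = (None, start)
def pvExtract (l : List Char) (start : Nat) : Option (List Char × Nat) :=
  (pvExtractGo (l.drop start) 0 start).map
    (fun (j : Nat) => (PySem.List.slice l (some (start : Int)) (some ((j : Int) + 1)), j + 1))

-- the `while True` loop; fuel := l.length + 1 never runs out because i strictly increases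
def pvLoopA (l : List Char) : Nat → Nat → List (Int × Int × String) → List (Int × Int × String)
  | 0, _, res => res
  | fuel + 1, i, res =>
    let idx := PySem.Chars.findFrom l pvPat (i : Int) none
    if idx < 0 then res
    else
      match pvExtract l idx.toNat with
      | none => pvLoopA l fuel (idx.toNat + 1) res
      | some (block, e) =>
        pvLoopA l fuel (idx.toNat + 1)
          (if block = [] then res else res ++ [(idx, (e : Int), String.ofList block)])

def find_footprint_blocks (text : String) : List (Int × Int × String) :=
  pvLoopA text.toList (text.toList.length + 1) 0 []

-- ===== PORT B =====
-- the for-loop of B: stack of (position, starts-a-footprint?) for every unmatched '('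
-- (text.startswith('(footprint ', i) is ported as startswith on l.drop i — exact for 0 ≤ i < len)
def pvScanB (l : List Char) : List Char → Nat → List (Nat × Bool) → List (Int × Int × String) → List (Int × Int × String)
  | [], _, _, res => res
  | c :: r, i, st, res =>
    if c = '(' then
      pvScanB l r (i + 1) ((i, PySem.Chars.startswith (l.drop i) pvPat) :: st) res
    else if c = ')' then
      match st with
      | [] => pvScanB l r (i + 1) [] res
      | (p, fp) :: st' =>
        pvScanB l r (i + 1) st'
          (if fp then
            res ++ [((p : Int), (i : Int) + 1,
              String.ofList (PySem.List.slice l (some (p : Int)) (some ((i : Int) + 1))))]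
           else res)
    else pvScanB l r (i + 1) st res

def find_footprint_blocks_alt (text : String) : List (Int × Int × String) :=
  PySem.List.sorted (pvScanB text.toList text.toList 0 [] []) (fun t => t.1) false

-- ===== PRECONDITION & SPEC =====
def Spec_find_footprint_blocks (text : String) (out : List (Int × Int × String)) : Prop := out = find_footprint_blocks_alt text
instance (text : String) (out : List (Int × Int × String)) : Decidable (Spec_find_footprint_blocks text out) := by unfold Spec_find_footprint_blocks; infer_instance

-- ===== CLAIM (what is proved, stated in full; the proofs are below) =====
def Claim_equal_find_footprint_blocks : Prop := ∀ (text : String), Dom_find_footprint_blocks text → Spec_find_footprint_blocks text (find_footprint_blocks text)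

-- ===== LEMMAS AND PROOFS =====

-- positions (relative) of the unmatched ')' of a suffix, in increasing order
def pvUC : List Char → List Nat
  | [] => []
  | c :: r =>
    if c = ')' then 0 :: (pvUC r).map (· + 1)
    else if c = '(' then ((pvUC r).tail).map (· + 1)
    else (pvUC r).map (· + 1)

def pvIsFP (l : List Char) (s : Nat) : Bool := PySem.Chars.startswith (l.drop s) pvPat

-- index of the ')' matching the '(' at position s
def pvClose (l : List Char) (s : Nat) : Option Nat :=
  (pvUC (l.drop (s + 1))).head?.map (fun j => s + 1 + j)

def pvEm (l : List Char) (s j : Nat) : Int × Int × String :=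
  ((s : Int), (j : Int) + 1, String.ofList (PySem.List.slice l (some (s : Int)) (some ((j : Int) + 1))))

-- the canonical result: footprint starts in increasing order, each with its matching close
def pvRes (l : List Char) (i : Nat) : List (Int × Int × String) :=
  (List.range' i (l.length - i)).filterMap
    (fun s => if pvIsFP l s then (pvClose l s).map (pvEm l s) else none)

-- emissions the stack entries will produce, paired with the unmatched closes of the suffix
def pvPops (l : List Char) : List (Nat × Bool) → List Nat → Nat → List (Int × Int × String)
  | (p, fp) :: st', c :: uc', i => (if fp then [pvEm l p (i + c)] else []) ++ pvPops l st' uc' i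
  | _, _, _ => []

theorem pvExtractGo_eq (r : List Char) : ∀ (d : Nat) (i : Nat),
    pvExtractGo r ((d : Int) + 1) i = ((pvUC r)[d]?).map (i + ·) := by
  induction r with
  | nil => intro d i; simp [pvExtractGo, pvUC]
  | cons c r ih =>
    intro d i
    by_cases hc : c = '('
    · subst hc
      have harith : ((d : Int) + 1) + 1 = ((d + 1 : Nat) : Int) + 1 := by push_cast; ring
      simp only [pvExtractGo, harith, ih (d + 1) (i + 1)]
      simp only [pvUC, reduceIte]
      cases h : (pvUC r)[d + 1]? <;>
        simp [List.getElem?_map, List.getElem?_tail, h, Nat.add_assoc, Nat.add_comm 1]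
    · by_cases hc' : c = ')'
      · subst hc'
        match d with
        | 0 => simp [pvExtractGo, pvUC]
        | e + 1 =>
          have hne : ¬ (((e + 1 : Nat) : Int) + 1 - 1 = 0) := by push_cast; omega
          have harith : ((e + 1 : Nat) : Int) + 1 - 1 = ((e : Nat) : Int) + 1 := by push_cast; ring
          simp only [pvExtractGo, if_neg (by decide : ¬ (')' = '(')),
            harith, ih e (i + 1)]
          simp only [pvUC, reduceIte]
          cases h : (pvUC r)[e]? <;>
            simp [List.getElem?_map, h, Nat.add_assoc, Nat.add_comm 1] <;> omega
      · simp only [pvExtractGo, if_neg hc, if_neg hc', ih d (i + 1)]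
        simp only [pvUC, if_neg hc', if_neg hc]
        cases h : (pvUC r)[d]? <;>
          simp [List.getElem?_map, h, Nat.add_assoc, Nat.add_comm 1]

theorem pvExtractGo_drop (l : List Char) (s : Nat) (h : l[s]? = some '(') :
    pvExtractGo (l.drop s) 0 s = pvClose l s := by
  obtain ⟨hlt, hget⟩ := List.getElem?_eq_some_iff.mp h
  have hd : l.drop s = '(' :: l.drop (s + 1) := by
    rw [List.drop_eq_getElem_cons hlt, hget]
  rw [hd]
  simp only [pvExtractGo]
  have h0 := pvExtractGo_eq (l.drop (s + 1)) 0 (s + 1)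
  have hcast : ((0 : Nat) : Int) + 1 = 0 + 1 := by norm_num
  rw [hcast] at h0
  rw [h0]
  simp [pvClose, List.head?_eq_getElem?]

theorem pvExtract_eq (l : List Char) (s : Nat) (h : l[s]? = some '(') :
    pvExtract l s = (pvClose l s).map
      (fun (j : Nat) => (PySem.List.slice l (some (s : Int)) (some ((j : Int) + 1)), j + 1)) := by
  rw [pvExtract, pvExtractGo_drop l s h]

theorem pvRes_of_ge (l : List Char) (i : Nat) (h : l.length ≤ i) : pvRes l i = [] := by
  simp [pvRes, Nat.sub_eq_zero_of_le h]

theorem pvRes_cons (l : List Char) (i : Nat) (h : i < l.length) :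
    pvRes l i = (if pvIsFP l i then ((pvClose l i).map (pvEm l i)).toList else []) ++ pvRes l (i + 1) := by
  have hn : l.length - i = (l.length - (i + 1)) + 1 := by omega
  rw [pvRes, hn, List.range'_succ, List.filterMap_cons]
  by_cases hfp : pvIsFP l i
  · cases hcl : pvClose l i <;> simp [hfp, pvRes]
  · simp [hfp, pvRes]

theorem pvRes_eq_of_noFP (l : List Char) (i m : Nat) (him : i ≤ m) (hm : m ≤ l.length)
    (h : ∀ s, i ≤ s → s < m → pvIsFP l s = false) : pvRes l i = pvRes l m := by
  revert hm h
  induction m, him using Nat.le_induction with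
  | base => intro _ _; rfl
  | succ m him ih =>
    intro hm h
    have h1 : pvRes l i = pvRes l m :=
      ih (by omega) (fun s hs hs' => h s hs (by omega))
    rw [h1, pvRes_cons l m (by omega), h m him (by omega)]
    simp

theorem pvGet_of_prefix (l : List Char) (i : Nat) (h : pvPat <+: l.drop i) :
    l[i]? = some '(' := by
  obtain ⟨t, ht⟩ := h
  have hp : pvPat = '(' :: "footprint ".toList := by decide
  rw [hp] at ht
  have h0 : (l.drop i)[0]? = some '(' := by rw [← ht]; rfl
  rw [List.getElem?_drop] at h0
  simpa using h0

theorem pvIsFP_eq_false (l : List Char) (i : Nat) (h : l[i]? ≠ some '(') :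
    pvIsFP l i = false := by
  rw [Bool.eq_false_iff]
  intro htrue
  exact h (pvGet_of_prefix l i ((PySem.Chars.startswith_iff _ _).mp htrue))

theorem pvNoFP_of_not_infix (l : List Char) (i : Nat) (h : ¬ pvPat <:+: l.drop i) :
    ∀ s, i ≤ s → pvIsFP l s = false := by
  intro s hs
  rw [Bool.eq_false_iff]
  intro htrue
  have hpre := (PySem.Chars.startswith_iff _ _).mp htrue
  have hdd : (l.drop i).drop (s - i) = l.drop s := by
    rw [List.drop_drop]; congr 1; omega
  exact h ((PySem.Chars.exists_prefix_drop_iff_isIn pvPat (l.drop i)).mp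
    ⟨s - i, by rw [hdd]; exact hpre⟩ |> (PySem.Chars.isIn_iff_infix _ _).mp)

theorem pvLoopA_eq (l : List Char) : ∀ (fuel i : Nat) (res : List (Int × Int × String)),
    i ≤ l.length → l.length - i < fuel → pvLoopA l fuel i res = res ++ pvRes l i := by
  intro fuel
  induction fuel with
  | zero => intro i res hi hf; omega
  | succ fuel ih =>
    intro i res hi hf
    rw [pvLoopA]
    simp only [PySem.Chars.findFrom_natCast l pvPat i hi]
    by_cases hfind : PySem.Chars.find (l.drop i) pvPat = -1
    · rw [if_pos hfind]
      rw [if_pos (by norm_num)]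
      have hnoinf : ¬ pvPat <:+: l.drop i := by
        rw [← PySem.Chars.find_eq_neg_one_iff]; exact hfind
      rw [pvRes_eq_of_noFP l i l.length hi le_rfl
        (fun s hs _ => pvNoFP_of_not_infix l i hnoinf s hs), pvRes_of_ge l l.length le_rfl]
      simp
    · rw [if_neg hfind]
      set f := PySem.Chars.find (l.drop i) pvPat with hfdef
      have hf0 : 0 ≤ f := (PySem.Chars.find_nonneg_iff _ _).mpr
        ((PySem.Chars.find_ne_neg_one_iff _ _).mp hfind)
      have hflen : f ≤ (l.drop i).length := by
        have := PySem.Chars.find_le_length (l.drop i) pvPat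
        simpa using this
      rw [if_neg (by omega)]
      obtain ⟨hpre, hmin⟩ := PySem.Chars.find_spec (s := l.drop i) (sub := pvPat) hf0
      set s0 := i + f.toNat with hs0def
      have htn : ((i : Int) + f).toNat = s0 := by omega
      have hpre' : pvPat <+: l.drop s0 := by
        rw [List.drop_drop] at hpre
        exact hpre
      have hget : l[s0]? = some '(' := pvGet_of_prefix l s0 hpre'
      have hs0lt : s0 < l.length := (List.getElem?_eq_some_iff.mp hget).1
      have hfp0 : pvIsFP l s0 = true := (PySem.Chars.startswith_iff _ _).mpr hpre'
      have hresi : pvRes l i = pvRes l s0 := by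
        apply pvRes_eq_of_noFP l i s0 (by omega) (by omega)
        intro s hs hs'
        rw [Bool.eq_false_iff]
        intro htrue
        have : ¬ pvPat <+: (l.drop i).drop (s - i) := hmin (s - i) (by omega)
        rw [List.drop_drop, Nat.add_comm, Nat.sub_add_cancel hs] at this
        exact this ((PySem.Chars.startswith_iff _ _).mp htrue)
      rw [htn, pvExtract_eq l s0 hget]
      cases hcl : pvClose l s0 with
      | none =>
        simp only [Option.map_none]
        rw [ih (s0 + 1) res (by omega) (by omega), hresi, pvRes_cons l s0 hs0lt]
        simp [hfp0, hcl]
      | some j =>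
        simp only [Option.map_some]
        have hjs : s0 + 1 ≤ j := by
          obtain ⟨k, hk, hjk⟩ := Option.map_eq_some_iff.mp hcl
          omega
        have hblock : PySem.List.slice l (some (s0 : Int)) (some ((j : Int) + 1)) ≠ [] := by
          have hcast : ((j : Int) + 1) = ((j + 1 : Nat) : Int) := by push_cast; ring
          rw [hcast, PySem.List.slice_natCast]
          intro hnil
          have hlen := congrArg List.length hnil
          simp at hlen
          omega
        rw [if_neg hblock]
        rw [ih (s0 + 1) _ (by omega) (by omega), hresi, pvRes_cons l s0 hs0lt]
        have htup : ((i : Int) + f, ((j + 1 : Nat) : Int),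
            String.ofList (PySem.List.slice l (some (s0 : Int)) (some ((j : Int) + 1))))
            = pvEm l s0 j := by
          simp only [pvEm, Prod.mk.injEq]
          refine ⟨by omega, by push_cast; ring, trivial⟩
        rw [htup]
        simp [hfp0, hcl]

theorem pvPops_nil_uc (l : List Char) (st : List (Nat × Bool)) (i : Nat) :
    pvPops l st [] i = [] := by
  cases st with
  | nil => rfl
  | cons pf st' => obtain ⟨p, fp⟩ := pf; rfl

theorem pvPops_shift (l : List Char) : ∀ (st : List (Nat × Bool)) (uc : List Nat) (i : Nat),
    pvPops l st (uc.map (· + 1)) i = pvPops l st uc (i + 1) := by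
  intro st
  induction st with
  | nil => intro uc i; rfl
  | cons pf st' ih =>
    intro uc i
    obtain ⟨p, fp⟩ := pf
    cases uc with
    | nil => rfl
    | cons u uc' =>
      simp only [List.map_cons, pvPops, ih]
      have he : i + (u + 1) = (i + 1) + u := by omega
      rw [he]

theorem pvPerm_swap {α : Type} (res F P R : List α) :
    (res ++ (F ++ P) ++ R).Perm (res ++ P ++ (F ++ R)) := by
  have h := (List.perm_append_comm (l₁ := F) (l₂ := P)).append_right R
  have h2 := h.append_left res
  simpa [List.append_assoc] using h2

theorem pvScanB_perm (l : List Char) : ∀ (r : List Char) (i : Nat) (st : List (Nat × Bool))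
    (res : List (Int × Int × String)), r = l.drop i →
    (pvScanB l r i st res).Perm (res ++ pvPops l st (pvUC r) i ++ pvRes l i) := by
  intro r
  induction r with
  | nil =>
    intro i st res hr
    have hlen : l.length ≤ i := by
      have := congrArg List.length hr
      simp at this
      omega
    rw [pvRes_of_ge l i hlen]
    simp [pvScanB, pvUC, pvPops_nil_uc]
  | cons c r' ih =>
    intro i st res hr
    have hci : l[i]? = some c := by
      have h0 : (l.drop i)[0]? = some c := by rw [← hr]; rfl
      rw [List.getElem?_drop] at h0
      simpa using h0
    have hi : i < l.length := (List.getElem?_eq_some_iff.mp hci).1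
    have hr' : r' = l.drop (i + 1) := by
      rw [← List.tail_drop, ← hr]
      rfl
    by_cases hc : c = '('
    · subst hc
      simp only [pvScanB, reduceIte]
      have hflag : PySem.Chars.startswith (l.drop i) pvPat = pvIsFP l i := rfl
      rw [hflag]
      refine (ih (i + 1) ((i, pvIsFP l i) :: st) res hr').trans ?_
      rw [pvRes_cons l i hi]
      have hcl : pvClose l i = (pvUC r').head?.map (fun j => i + 1 + j) := by
        rw [pvClose, hr']
      have hUC : pvUC ('(' :: r') = ((pvUC r').tail).map (· + 1) := by
        simp [pvUC]
      rw [hUC, hcl]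
      cases huc : pvUC r' with
      | nil =>
        simp [pvPops, pvPops_nil_uc]
      | cons u uc' =>
        simp only [List.tail_cons, pvPops, pvPops_shift, List.head?_cons, Option.map_some]
        cases hfp : pvIsFP l i
        · simp
        · simp only [if_pos, Option.toList_some]
          exact pvPerm_swap res [pvEm l i (i + 1 + u)] (pvPops l st uc' (i + 1)) (pvRes l (i + 1))
    · by_cases hc' : c = ')'
      · subst hc'
        have hfp : pvIsFP l i = false := pvIsFP_eq_false l i (by rw [hci]; simp)
        have hUC : pvUC (')' :: r') = 0 :: (pvUC r').map (· + 1) := by simp [pvUC]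
        cases st with
        | nil =>
          simp only [pvScanB, reduceIte]
          refine (ih (i + 1) [] res hr').trans ?_
          rw [pvRes_cons l i hi, hfp, hUC]
          simp [pvPops]
        | cons pf st' =>
          obtain ⟨p, fp⟩ := pf
          simp only [pvScanB, reduceIte]
          refine (ih (i + 1) st' _ hr').trans ?_
          rw [pvRes_cons l i hi, hfp, hUC]
          simp only [pvPops, pvPops_shift, Bool.false_eq_true, if_false, List.nil_append]
          cases fp
          · simp
          · have he : ((p : Int), (i : Int) + 1,
                String.ofList (PySem.List.slice l (some (p : Int)) (some ((i : Int) + 1))))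
                = pvEm l p (i + 0) := by simp [pvEm]
            rw [he]
            simp [List.append_assoc]
      · have hstep : pvScanB l (c :: r') i st res = pvScanB l r' (i + 1) st res := by
          rw [pvScanB.eq_def]
          simp only [if_neg hc, if_neg hc']
        rw [hstep]
        have hfp : pvIsFP l i = false := pvIsFP_eq_false l i (by rw [hci]; simp [hc])
        have hUC : pvUC (c :: r') = (pvUC r').map (· + 1) := by simp [pvUC, hc, hc']
        refine (ih (i + 1) st res hr').trans ?_
        rw [pvRes_cons l i hi, hfp, hUC, pvPops_shift]
        simp

theorem pvRes_mem_ge (l : List Char) (i : Nat) (x : Int × Int × String) (hx : x ∈ pvRes l i) :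
    (i : Int) ≤ x.1 := by
  rw [pvRes, List.mem_filterMap] at hx
  obtain ⟨s, hs, hfs⟩ := hx
  rw [List.mem_range'_1] at hs
  split at hfs
  · obtain ⟨j, _, hxj⟩ := Option.map_eq_some_iff.mp hfs
    rw [← hxj]
    simp only [pvEm]
    exact_mod_cast hs.1
  · exact absurd hfs (by simp)

theorem pvRes_pairwise (l : List Char) (i : Nat) :
    (pvRes l i).Pairwise (fun a b => a.1 < b.1) := by
  suffices H : ∀ (k j : Nat), l.length - j ≤ k →
      (pvRes l j).Pairwise (fun a b => a.1 < b.1) from H l.length i (by omega)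
  intro k
  induction k with
  | zero => intro j h; rw [pvRes_of_ge l j (by omega)]; exact List.Pairwise.nil
  | succ k ihk =>
    intro j h
    by_cases hj : j < l.length
    · rw [pvRes_cons l j hj]
      apply List.pairwise_append.mpr
      refine ⟨?_, ihk (j + 1) (by omega), ?_⟩
      · split
        · cases pvClose l j <;> simp
        · simp
      · intro a ha b hb
        have hb' : ((j : Int) + 1) ≤ b.1 := by
          have := pvRes_mem_ge l (j + 1) b hb
          push_cast at this
          omega
        have ha' : a.1 = (j : Int) := by
          split at ha
          · cases hcl : pvClose l j with
            | none => rw [hcl] at ha; simp at ha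
            | some jj =>
              rw [hcl] at ha
              simp only [Option.map_some, Option.toList_some, List.mem_singleton] at ha
              rw [ha]; rfl
          · simp at ha
        omega
    · rw [pvRes_of_ge l j (by omega)]; exact List.Pairwise.nil

-- ===== VERDICT (by name: the statement is the Claim_ definition above) =====
theorem find_footprint_blocks_spec : Claim_equal_find_footprint_blocks := by
  intro text _
  unfold Spec_find_footprint_blocks
  rw [find_footprint_blocks, find_footprint_blocks_alt]
  have hA := pvLoopA_eq text.toList (text.toList.length + 1) 0 [] (Nat.zero_le _) (by omega)
  have hperm : (pvRes text.toList 0).Perm (pvScanB text.toList text.toList 0 [] []) := by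
    have h := pvScanB_perm text.toList text.toList 0 [] [] (by simp)
    simpa [pvPops] using h.symm
  rw [hA, PySem.List.sorted_eq_of_perm_of_pairwise_lt _ _ _ hperm (pvRes_pairwise text.toList 0)]
  simp
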